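-- pv_equiv track=rewrite | github.com/Jerempire/gym-anything | benchmarks/cua_world/environments/graphite_env/tasks/infrastructure_unit_standardization/verifier.py | _find_graph_by_title
-- ===== SOURCE A (Python) =====
-- def _find_graph_by_title(graphs, expected_title):
--     """Find a graph by exact title, then case-insensitive partial match."""
--     for title, targets in graphs:
--         if title == expected_title:
--             return title, targets
--     for title, targets in graphs:
--         if expected_title.lower() in title.lower():
--             return title, targets
--     return None, None
-- ===== SOURCE B (Python) =====
-- def _find_graph_by_title(graphs, expected_title):
--     """One pass: return exact match immediately; remember the first
--     case-insensitive partial match and use it only if no exact match exists."""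
--     needle = expected_title.lower()
--     partial = None
--     for title, targets in graphs:
--         if title == expected_title:
--             return title, targets
--         if partial is None and needle in title.lower():
--             partial = (title, targets)
--     return partial if partial is not None else (None, None)
-- ===== Notes on version B (the rewrite author's own statement) =====
-- stated objective: simpler
-- what changed: Replaces A's two full scans (exact pass, then partial pass) by a single pass that returns an exact match immediately and remembers the first case-insensitive partial match in an accumulator, lowercasing expected_title once instead of once per element.
import Mathlib
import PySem

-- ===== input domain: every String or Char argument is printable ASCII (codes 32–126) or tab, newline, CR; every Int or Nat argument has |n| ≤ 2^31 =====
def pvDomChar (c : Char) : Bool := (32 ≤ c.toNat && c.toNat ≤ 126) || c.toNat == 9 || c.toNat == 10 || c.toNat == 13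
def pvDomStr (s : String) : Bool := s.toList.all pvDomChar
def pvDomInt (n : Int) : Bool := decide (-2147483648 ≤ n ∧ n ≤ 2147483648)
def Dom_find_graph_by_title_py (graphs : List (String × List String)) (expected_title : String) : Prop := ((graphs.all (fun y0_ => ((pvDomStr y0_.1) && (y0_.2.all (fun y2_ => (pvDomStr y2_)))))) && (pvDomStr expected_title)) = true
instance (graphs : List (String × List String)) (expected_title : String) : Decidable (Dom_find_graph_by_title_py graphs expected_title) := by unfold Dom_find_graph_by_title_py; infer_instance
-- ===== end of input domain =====

-- B collapses A's two scans into one pass that returns an exact match at once and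
-- remembers the first case-insensitive partial match; same return value everywhere.


-- ===== PORT A =====
-- first loop: 'for title, targets in graphs: if title == expected_title: return title, targets'
def pvA_exactLoop (graphs : List (String × List String)) (expected_title : String) : Option (String × List String) :=
  match graphs with
  | [] => none
  | (title, targets) :: rest =>
    if title == expected_title then some (title, targets)
    else pvA_exactLoop rest expected_title

-- second loop: 'for title, targets in graphs: if expected_title.lower() in title.lower(): return title, targets'
def pvA_partialLoop (graphs : List (String × List String)) (expected_title : String) : Option (String × List String) :=
  match graphs with
  | [] => none
  | (title, targets) :: rest =>
    if PySem.Str.isIn (PySem.Str.lower expected_title) (PySem.Str.lower title) then some (title, targets)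
    else pvA_partialLoop rest expected_title

def find_graph_by_title_py (graphs : List (String × List String)) (expected_title : String) : Option String × Option (List String) :=
  match pvA_exactLoop graphs expected_title with
  | some (title, targets) => (some title, some targets)
  | none =>
    match pvA_partialLoop graphs expected_title with
    | some (title, targets) => (some title, some targets)
    | none => (none, none)

-- ===== PORT B =====
-- single loop with the 'partial' accumulator; 'needle' is expected_title.lower() computed once
def pvB_loop (graphs : List (String × List String)) (expected_title needle : String)
    (partial_ : Option (String × List String)) : Option String × Option (List String) :=
  match graphs with
  | [] =>
    match partial_ with
    | some (title, targets) => (some title, some targets)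
    | none => (none, none)
  | (title, targets) :: rest =>
    if title == expected_title then (some title, some targets)
    else pvB_loop rest expected_title needle
      (if partial_.isNone && PySem.Str.isIn needle (PySem.Str.lower title) then some (title, targets)
       else partial_)

def find_graph_by_title_py_alt (graphs : List (String × List String)) (expected_title : String) : Option String × Option (List String) :=
  pvB_loop graphs expected_title (PySem.Str.lower expected_title) none

-- ===== PRECONDITION & SPEC =====
def Spec_find_graph_by_title_py (graphs : List (String × List String)) (expected_title : String) (out : Option String × Option (List String)) : Prop := out = find_graph_by_title_py_alt graphs expected_title
instance (graphs : List (String × List String)) (expected_title : String) (out : Option String × Option (List String)) : Decidable (Spec_find_graph_by_title_py graphs expected_title out) := by unfold Spec_find_graph_by_title_py; infer_instance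

-- ===== CLAIM (what is proved, stated in full; the proofs are below) =====
def Claim_equal_find_graph_by_title_py : Prop := ∀ (graphs : List (String × List String)) (expected_title : String), Dom_find_graph_by_title_py graphs expected_title → Spec_find_graph_by_title_py graphs expected_title (find_graph_by_title_py graphs expected_title)

-- ===== LEMMAS AND PROOFS =====
def pvFin (o : Option (String × List String)) : Option String × Option (List String) :=
  match o with
  | some (title, targets) => (some title, some targets)
  | none => (none, none)

-- loop invariant: B's one-pass loop with accumulator equals "exact hit, else stored partial, else A's partial scan"
lemma pvB_loop_eq (expected_title : String) :
    ∀ (graphs : List (String × List String)) (acc : Option (String × List String)),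
      pvB_loop graphs expected_title (PySem.Str.lower expected_title) acc =
        match pvA_exactLoop graphs expected_title with
        | some p => pvFin (some p)
        | none => pvFin (acc.orElse (fun _ => pvA_partialLoop graphs expected_title)) := by
  intro graphs
  induction graphs with
  | nil => intro acc; cases acc <;> rfl
  | cons hd tl ih =>
    intro acc
    obtain ⟨title, targets⟩ := hd
    by_cases hex : (title == expected_title) = true
    · simp [pvB_loop, pvA_exactLoop, hex, pvFin]
    · rw [show pvB_loop ((title, targets) :: tl) expected_title (PySem.Str.lower expected_title) acc
            = pvB_loop tl expected_title (PySem.Str.lower expected_title)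
                (if acc.isNone && PySem.Str.isIn (PySem.Str.lower expected_title) (PySem.Str.lower title)
                 then some (title, targets) else acc) by simp [pvB_loop, hex]]
      rw [ih]
      cases acc with
      | some p => simp [pvA_exactLoop, hex, Option.orElse]
      | none =>
        simp only [pvA_exactLoop, pvA_partialLoop, hex, Option.orElse, Option.isNone,
          Bool.true_and]
        cases pvA_exactLoop tl expected_title <;> split_ifs <;> simp_all [pvFin]

-- ===== VERDICT (by name: the statement is the Claim_ definition above) =====
theorem find_graph_by_title_py_spec : Claim_equal_find_graph_by_title_py := by
  intro graphs expected_title _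
  unfold Spec_find_graph_by_title_py find_graph_by_title_py find_graph_by_title_py_alt
  rw [pvB_loop_eq]
  cases h1 : pvA_exactLoop graphs expected_title with
  | some p => obtain ⟨t, tg⟩ := p; rfl
  | none =>
    simp only [Option.orElse]
    cases h2 : pvA_partialLoop graphs expected_title with
    | some p => obtain ⟨t, tg⟩ := p; rfl
    | none => rfl
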